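-- pv_equiv track=rewrite | github.com/brayvasq/sudoku | Alg_Sudoku/algor_linea_de_candidatos.py | obtener_repeticiones
-- ===== SOURCE A (Python) =====
-- def obtener_repeticiones(valores,valores_fila):
--     diccionario = {}
--
--     for i in valores:
--         diccionario[i] = 0
--
--     for j in valores_fila:
--         if valores.__contains__(j):
--             diccionario[j] += 1
--
--     return diccionario
-- ===== SOURCE B (Python) =====
-- def obtener_repeticiones(valores, valores_fila):
--     # Sort the row values once, then answer each candidate by binary search:
--     # the number of occurrences of v in a sorted list is
--     # bisect_right(orden, v) - bisect_left(orden, v).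
--     orden = sorted(valores_fila)
--
--     def bisect_left(a, x):
--         lo, hi = 0, len(a)
--         while lo < hi:
--             mid = (lo + hi) // 2
--             if a[mid] < x:
--                 lo = mid + 1
--             else:
--                 hi = mid
--         return lo
--
--     def bisect_right(a, x):
--         lo, hi = 0, len(a)
--         while lo < hi:
--             mid = (lo + hi) // 2
--             if x < a[mid]:
--                 hi = mid
--             else:
--                 lo = mid + 1
--         return lo
--
--     return {v: bisect_right(orden, v) - bisect_left(orden, v) for v in valores}
-- ===== Notes on version B (the rewrite author's own statement) =====
-- stated objective: faster
-- what changed: B sorts valores_fila once and computes each candidate's count by binary search (bisect_right - bisect_left on the sorted list), replacing A's per-element linear membership scan and increment loop.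
import Mathlib
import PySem

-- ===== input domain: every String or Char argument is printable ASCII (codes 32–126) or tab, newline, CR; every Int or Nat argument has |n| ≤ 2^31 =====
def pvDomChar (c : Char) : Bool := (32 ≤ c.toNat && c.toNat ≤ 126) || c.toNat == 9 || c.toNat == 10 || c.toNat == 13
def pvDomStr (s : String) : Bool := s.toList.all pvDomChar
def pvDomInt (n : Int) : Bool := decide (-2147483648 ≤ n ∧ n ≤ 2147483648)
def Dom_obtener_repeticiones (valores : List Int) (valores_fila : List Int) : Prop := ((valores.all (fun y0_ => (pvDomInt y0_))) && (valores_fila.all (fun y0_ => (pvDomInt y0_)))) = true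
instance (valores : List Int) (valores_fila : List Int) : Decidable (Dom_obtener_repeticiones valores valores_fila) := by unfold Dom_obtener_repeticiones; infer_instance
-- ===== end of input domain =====

-- B sorts valores_fila once and answers each candidate by binary search instead of A's per-element membership scan; objective: faster.

-- ===== PORT A =====
-- diccionario = {}; for i in valores: diccionario[i] = 0
-- for j in valores_fila: if valores.__contains__(j): diccionario[j] += 1
-- (the += 1 always finds the key, since j ∈ valores was just inserted; modify with default 0 is exact here)
def obtener_repeticiones (valores : List Int) (valores_fila : List Int) : List (Int × Int) :=
  let d0 : PySem.Dict Int Int := valores.foldl (fun d i => d.insert i 0) PySem.Dict.empty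
  let d1 : PySem.Dict Int Int :=
    valores_fila.foldl (fun d j => if valores.contains j then d.modify j 0 (· + 1) else d) d0
  d1.items

-- ===== PORT B =====
-- orden = sorted(valores_fila)
-- bisect_left / bisect_right are Source B's hand-written CPython-style loops (lo,hi; mid=(lo+hi)//2);
-- PySem.List.bisectLeft / bisectRight are exactly that loop, so they are the transliteration.
-- return {v: bisect_right(orden, v) - bisect_left(orden, v) for v in valores}
def obtener_repeticiones_alt (valores : List Int) (valores_fila : List Int) : List (Int × Int) :=
  let orden : List Int := PySem.List.sorted valores_fila (fun x => x) false
  let res : PySem.Dict Int Int :=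
    valores.foldl
      (fun d v => d.insert v ((PySem.List.bisectRight orden v : Int) - (PySem.List.bisectLeft orden v : Int)))
      PySem.Dict.empty
  res.items

-- ===== PRECONDITION & SPEC =====
def Spec_obtener_repeticiones (valores : List Int) (valores_fila : List Int) (out : List (Int × Int)) : Prop := out = obtener_repeticiones_alt valores valores_fila
instance (valores : List Int) (valores_fila : List Int) (out : List (Int × Int)) : Decidable (Spec_obtener_repeticiones valores valores_fila out) := by unfold Spec_obtener_repeticiones; infer_instance

-- ===== CLAIM (what is proved, stated in full; the proofs are below) =====
def Claim_equal_obtener_repeticiones : Prop := ∀ (valores : List Int) (valores_fila : List Int), Dom_obtener_repeticiones valores valores_fila → Spec_obtener_repeticiones valores valores_fila (obtener_repeticiones valores valores_fila)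

-- ===== LEMMAS AND PROOFS =====

-- every value in the zero-initialised dict reads 0
theorem getD_foldl_insert_zero (l : List Int) (d : PySem.Dict Int Int) (k : Int)
    (h : d.getD k 0 = 0) : (l.foldl (fun d i => d.insert i (0:Int)) d).getD k 0 = 0 := by
  induction l generalizing d with
  | nil => exact h
  | cons x xs ih =>
      simp only [List.foldl_cons]
      exact ih _ (by rw [PySem.Dict.getD_insert]; split <;> simp [h])

-- a lookup after an insert-loop whose value depends only on the key
theorem getD_foldl_insert_keyfun (l : List Int) (g : Int → Int) (d : PySem.Dict Int Int) (k : Int) :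
    (l.foldl (fun d v => d.insert v (g v)) d).getD k 0 =
      if k ∈ l then g k else d.getD k 0 := by
  induction l generalizing d with
  | nil => simp
  | cons x xs ih =>
      simp only [List.foldl_cons, ih, List.mem_cons]
      by_cases hx : k ∈ xs
      · simp [hx]
      · rw [PySem.Dict.getD_insert]
        by_cases hk : k = x <;> simp [hk, hx]

-- countP of a list whose p-elements are exactly the first k positions
theorem countP_eq_of_boundary (p : Int → Bool) :
    ∀ (l : List Int) (k : Nat), k ≤ l.length →
      (∀ j (hj : j < l.length), j < k → p l[j]) →
      (∀ j (hj : j < l.length), k ≤ j → ¬ p l[j]) →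
      l.countP p = k := by
  intro l
  induction l with
  | nil => intro k hk _ _; simp at hk; simp [hk]
  | cons c t ih =>
      intro k hk h1 h2
      cases k with
      | zero =>
          have hc : ¬ p c := by simpa using h2 0 (by simp) (Nat.zero_le 0)
          rw [List.countP_cons, if_neg hc]
          have := ih 0 (Nat.zero_le _) (fun j hj hlt => absurd hlt (Nat.not_lt_zero j))
            (fun j hj _ => by simpa using h2 (j+1) (by simpa using Nat.succ_lt_succ hj) (Nat.zero_le _))
          omega
      | succ k' =>
          have hc : p c := by simpa using h1 0 (by simp) (Nat.succ_pos k')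
          rw [List.countP_cons, if_pos hc]
          have := ih k' (by simpa using Nat.succ_le_succ_iff.mp hk)
            (fun j hj hlt => by simpa using h1 (j+1) (by simpa using Nat.succ_lt_succ hj) (Nat.succ_lt_succ hlt))
            (fun j hj hge => by simpa using h2 (j+1) (by simpa using Nat.succ_lt_succ hj) (Nat.succ_le_succ hge))
          omega

-- countP (≤ x) = countP (< x) + count x, on any Int list
theorem countP_le_split (x : Int) (l : List Int) :
    l.countP (fun y => decide (y ≤ x)) = l.countP (fun y => decide (y < x)) + l.count x := by
  induction l with
  | nil => simp
  | cons a t ih =>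
      rw [List.countP_cons, List.countP_cons, List.count_cons]
      by_cases ha : a = x
      · subst ha; simp; omega
      · have hxa : ¬ (a == x) = true := by simpa using ha
        rw [if_neg hxa]
        by_cases hlt : a < x
        · rw [if_pos (by simpa using le_of_lt hlt), if_pos (by simpa using hlt)]
          omega
        · have hle : ¬ a ≤ x := fun h => hlt (lt_of_le_of_ne h ha)
          rw [if_neg (by simpa using hle), if_neg (by simpa using hlt)]
          omega

-- on a sorted list, bisect_right - bisect_left is the multiplicity
theorem bisect_diff_eq_count (l : List Int) (hl : l.Pairwise (· ≤ ·)) (x : Int) :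
    (PySem.List.bisectRight l x : Int) - (PySem.List.bisectLeft l x : Int) = l.count x := by
  obtain ⟨hblen, hb1, hb2⟩ := PySem.List.bisectLeft_spec l x hl
  obtain ⟨hrlen, hr1, hr2⟩ := PySem.List.bisectRight_spec l x hl
  have hbl : l.countP (fun y => decide (y < x)) = PySem.List.bisectLeft l x :=
    countP_eq_of_boundary _ l _ hblen
      (fun j hj hlt => by simpa using hb1 j hj hlt)
      (fun j hj hge => by simpa using not_lt.mpr (hb2 j hj hge))
  have hbr : l.countP (fun y => decide (y ≤ x)) = PySem.List.bisectRight l x :=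
    countP_eq_of_boundary _ l _ hrlen
      (fun j hj hlt => by simpa using hr1 j hj hlt)
      (fun j hj hge => by simpa using not_le.mpr (hr2 j hj hge))
  have := countP_le_split x l
  omega

theorem obtener_repeticiones_spec_aux (valores valores_fila : List Int) :
    obtener_repeticiones valores valores_fila = obtener_repeticiones_alt valores valores_fila := by
  unfold obtener_repeticiones obtener_repeticiones_alt
  simp only
  -- turn A's guarded loop into a loop over the filtered list
  rw [show (fun (d : PySem.Dict Int Int) j => if valores.contains j then d.modify j 0 (· + 1) else d)
        = (fun d j => if valores.contains j = true then d.modify j 0 (· + 1) else d) from rfl,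
      ← List.foldl_filter]
  set orden : List Int := PySem.List.sorted valores_fila (fun x => x) false with horden
  set d0 : PySem.Dict Int Int := valores.foldl (fun d i => d.insert i 0) PySem.Dict.empty with hd0
  set fl := valores_fila.filter (fun j => valores.contains j) with hfl
  set dA := fl.foldl (fun d j => d.modify j 0 (· + 1)) d0 with hdA
  set g : Int → Int := fun v => (PySem.List.bisectRight orden v : Int) - (PySem.List.bisectLeft orden v : Int) with hg
  set dB := valores.foldl (fun d v => d.insert v (g v)) PySem.Dict.empty with hdB
  -- keys of both sides: the distinct elements of valores
  have hkeys0 : d0.keys = PySem.Set.ofList valores := by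
    rw [hd0, PySem.Dict.keys_foldl_insert (f := fun _ _ => (0:Int)), PySem.Dict.keys_empty,
        PySem.Set.update_nil_left]
  have hkeysA : dA.keys = PySem.Set.ofList valores := by
    rw [hdA, PySem.Dict.keys_foldl_modify (d0 := 0) (f := fun _ _ => (· + 1)), hkeys0,
        PySem.Set.update_eq_append_filter]
    have : (PySem.Set.ofList fl).filter (fun y => !(PySem.Set.contains (PySem.Set.ofList valores) y)) = [] := by
      apply List.filter_eq_nil_iff.mpr
      intro y hy
      have hy' : y ∈ fl := (PySem.Set.mem_ofList _ _).mp hy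
      have hc : valores.contains y = true := (List.mem_filter.mp (hfl ▸ hy')).2
      simp only [PySem.Set.contains_eq_listContains, Bool.not_eq_eq_eq_not, Bool.not_true]
      simpa [PySem.Set.mem_ofList] using hc
    rw [this, List.append_nil]
  have hndA : dA.keys.Nodup := hkeysA ▸ PySem.Set.nodup_ofList valores
  have hkeysB : dB.keys = PySem.Set.ofList valores := by
    rw [hdB, PySem.Dict.keys_foldl_insert (f := fun _ v => g v),
        PySem.Dict.keys_empty, PySem.Set.update_nil_left]
  have hndB : dB.keys.Nodup := hkeysB ▸ PySem.Set.nodup_ofList valores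
  -- values agree on every key of valores
  have hval : ∀ k ∈ valores, dA.getD k 0 = dB.getD k 0 := by
    intro k hk
    have hA : dA.getD k 0 = valores_fila.count k := by
      rw [hdA, PySem.Dict.getD_foldl_modify_add_one,
          getD_foldl_insert_zero valores _ k (by simp [PySem.Dict.getD_empty]), hfl,
          List.count_filter (p := fun j => valores.contains j) (List.elem_eq_true_of_mem hk)]
      omega
    have hB : dB.getD k 0 = valores_fila.count k := by
      have hsort : orden.Pairwise (· ≤ ·) := by
        simpa using PySem.List.sorted_pairwise valores_fila (fun x => x)
      have hperm : orden.Perm valores_fila := PySem.List.sorted_perm valores_fila (fun x => x) false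
      rw [hdB, getD_foldl_insert_keyfun, if_pos hk]
      exact (bisect_diff_eq_count orden hsort k).trans (by rw [hperm.count_eq])
    rw [hA, hB]
  -- items are keys paired with values
  rw [PySem.Dict.items_eq_map_keys dA hndA 0, PySem.Dict.items_eq_map_keys dB hndB 0,
      hkeysA, hkeysB]
  exact List.map_congr_left (fun k hk => by
    rw [hval k ((PySem.Set.mem_ofList _ _).mp hk)])

-- ===== VERDICT (by name: the statement is the Claim_ definition above) =====
theorem obtener_repeticiones_spec : Claim_equal_obtener_repeticiones := by
  intro valores valores_fila _
  exact obtener_repeticiones_spec_aux valores valores_fila
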